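-- pv_equiv track=rewrite | github.com/adityaB-code100/Competitive_Programming | Practicle/Question2/Hartals.py | hartals
-- ===== SOURCE A (Python) =====
-- def hartals(test_cases):
--     results = []
--
--     for case in test_cases:
--         days, parties, h_values = case
--
--         lost_days = set()
--
--         for h in h_values:
--             for day in range(h, days + 1, h):
--                 if day % 7 not in (6, 0):
--                     lost_days.add(day)
--
--         results.append(len(lost_days))
--
--     return results
-- ===== SOURCE B (Python) =====
-- def hartals(test_cases):
--     results = []
--     for days, parties, h_values in test_cases:
--         hits = sorted(day for h in h_values
--                           for day in range(h, days + 1, h)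
--                           if day % 7 not in (6, 0))
--         count = 0
--         prev = None
--         for d in hits:
--             if prev is None or d != prev:
--                 count += 1
--                 prev = d
--         results.append(count)
--     return results
-- ===== Notes on version B (the rewrite author's own statement) =====
-- stated objective: alternative
-- what changed: B flattens every party's non-weekend multiples into one list, sorts it, and counts distinct days by a single adjacent-comparison scan, instead of A's hash-set insertion with a final size read.
import Mathlib
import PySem

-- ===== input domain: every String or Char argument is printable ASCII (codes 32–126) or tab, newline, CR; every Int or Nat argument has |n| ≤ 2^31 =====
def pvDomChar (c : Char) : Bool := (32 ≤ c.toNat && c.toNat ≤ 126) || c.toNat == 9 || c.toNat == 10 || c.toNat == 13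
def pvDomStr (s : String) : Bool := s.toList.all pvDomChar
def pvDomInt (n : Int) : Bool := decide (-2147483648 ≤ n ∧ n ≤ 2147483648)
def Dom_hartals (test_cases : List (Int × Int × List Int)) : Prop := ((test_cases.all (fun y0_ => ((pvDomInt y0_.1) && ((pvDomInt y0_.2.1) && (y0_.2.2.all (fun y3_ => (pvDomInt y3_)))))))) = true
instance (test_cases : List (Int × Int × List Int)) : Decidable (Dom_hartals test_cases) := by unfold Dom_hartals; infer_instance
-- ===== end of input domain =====

-- B flattens every party's non-weekend multiples into one list, sorts it, and counts distinct days
-- by one adjacent-comparison scan, instead of A's set insertion with a final size read.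

-- ===== PORT A =====
-- Python's 'set' is used here only through add and len (its iteration order is never consumed),
-- so it is modelled by Std.HashSet: exact for membership/len, and evaluable on large inputs.
def hartals (test_cases : List (Int × Int × List Int)) : List Int :=
  test_cases.foldl (fun results case =>
    let days := case.1
    let h_values := case.2.2
    let lost_days : Std.HashSet Int :=
      h_values.foldl (fun s h =>
        (PySem.List.pyRange h (days + 1) h).foldl (fun s day =>
          if !(PySem.Int.mod day 7 == 6 || PySem.Int.mod day 7 == 0) then s.insert day
          else s) s)
        ∅
    results ++ [(lost_days.size : Int)]) []

-- ===== PORT B =====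
def hartals_alt (test_cases : List (Int × Int × List Int)) : List Int :=
  test_cases.foldl (fun results case =>
    let days := case.1
    let h_values := case.2.2
    let hits : List Int :=
      (h_values.flatMap (fun h =>
        (PySem.List.pyRange h (days + 1) h).filter (fun day =>
          !(PySem.Int.mod day 7 == 6 || PySem.Int.mod day 7 == 0)))).mergeSort
        (fun a b => a ≤ b)
    let r := hits.foldl (fun st d =>
        if st.2 == none || !(some d == st.2) then (st.1 + 1, some d) else st)
      ((0 : Int), (none : Option Int))
    results ++ [r.1]) []

-- ===== PRECONDITION & SPEC =====
-- Pre_ excludes exactly the inputs with a hartal parameter h = 0, on which the Python A (and B)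
-- raises ValueError ('range() arg 3 must not be zero'); on every other input A returns normally.
def Pre_hartals (test_cases : List (Int × Int × List Int)) : Prop :=
  ∀ c ∈ test_cases, ∀ h ∈ c.2.2, h ≠ 0
instance (test_cases : List (Int × Int × List Int)) : Decidable (Pre_hartals test_cases) := by
  unfold Pre_hartals; infer_instance
def pvWitness_hartals : (List (Int × Int × List Int)) := [(14, 3, [3, 4, 8])]

def Spec_hartals (test_cases : List (Int × Int × List Int)) (out : List Int) : Prop := out = hartals_alt test_cases
instance (test_cases : List (Int × Int × List Int)) (out : List Int) : Decidable (Spec_hartals test_cases out) := by unfold Spec_hartals; infer_instance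

-- ===== CLAIM (what is proved, stated in full; the proofs are below) =====
def Claim_equal_hartals : Prop := ∀ (test_cases : List (Int × Int × List Int)), Dom_hartals test_cases → Pre_hartals test_cases → Spec_hartals test_cases (hartals test_cases)

-- ===== LEMMAS AND PROOFS =====

-- the per-day condition both programs test (not a weekend day)
def pvP7 (day : Int) : Bool := !(PySem.Int.mod day 7 == 6 || PySem.Int.mod day 7 == 0)

-- a fold of conditional Set.add keeps Nodup
theorem pv_nodup_foldl_add (l : List Int) (s : PySem.Set Int) (hs : s.Nodup) :
    (l.foldl (fun s day => if pvP7 day then PySem.Set.add s day else s) s).Nodup := by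
  induction l generalizing s with
  | nil => exact hs
  | cons a t ih =>
      simp only [List.foldl_cons]
      split
      · exact ih _ (PySem.Set.nodup_add _ _ hs)
      · exact ih _ hs

-- membership after the inner day loop
theorem pv_mem_foldl_add (l : List Int) (s : PySem.Set Int) (y : Int) :
    y ∈ l.foldl (fun s day => if pvP7 day then PySem.Set.add s day else s) s ↔
      y ∈ s ∨ (y ∈ l ∧ pvP7 y = true) := by
  induction l generalizing s with
  | nil => simp
  | cons a t ih =>
      simp only [List.foldl_cons, List.mem_cons]
      by_cases h : pvP7 a = true
      · rw [if_pos h, ih]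
        simp only [PySem.Set.mem_add]
        constructor
        · rintro ((hy | rfl) | ⟨hy, hp⟩)
          · exact Or.inl hy
          · exact Or.inr ⟨Or.inl rfl, h⟩
          · exact Or.inr ⟨Or.inr hy, hp⟩
        · rintro (hy | ⟨(rfl | hy), hp⟩)
          · exact Or.inl (Or.inl hy)
          · exact Or.inl (Or.inr rfl)
          · exact Or.inr ⟨hy, hp⟩
      · rw [if_neg h, ih]
        constructor
        · rintro (hy | ⟨hy, hp⟩)
          · exact Or.inl hy
          · exact Or.inr ⟨Or.inr hy, hp⟩
        · rintro (hy | ⟨(rfl | hy), hp⟩)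
          · exact Or.inl hy
          · exact (h hp).elim
          · exact Or.inr ⟨hy, hp⟩

-- membership in A's whole lost_days set
theorem pv_mem_lost (days : Int) (hv : List Int) (s : PySem.Set Int) (y : Int) :
    y ∈ hv.foldl (fun s h =>
        (PySem.List.pyRange h (days + 1) h).foldl
          (fun s day => if pvP7 day then PySem.Set.add s day else s) s) s ↔
      y ∈ s ∨ ((∃ h ∈ hv, y ∈ PySem.List.pyRange h (days + 1) h) ∧ pvP7 y = true) := by
  induction hv generalizing s with
  | nil => simp
  | cons a t ih =>
      simp only [List.foldl_cons, ih, pv_mem_foldl_add, List.mem_cons]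
      constructor
      · rintro ((hy | ⟨hy, hp⟩) | ⟨⟨h, hh, hy⟩, hp⟩)
        · exact Or.inl hy
        · exact Or.inr ⟨⟨a, Or.inl rfl, hy⟩, hp⟩
        · exact Or.inr ⟨⟨h, Or.inr hh, hy⟩, hp⟩
      · rintro (hy | ⟨⟨h, (rfl | hh), hy⟩, hp⟩)
        · exact Or.inl (Or.inl hy)
        · exact Or.inl (Or.inr ⟨hy, hp⟩)
        · exact Or.inr ⟨⟨h, hh, hy⟩, hp⟩

-- A's lost_days set stays Nodup
theorem pv_nodup_lost (days : Int) (hv : List Int) (s : PySem.Set Int) (hs : s.Nodup) :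
    (hv.foldl (fun s h =>
        (PySem.List.pyRange h (days + 1) h).foldl
          (fun s day => if pvP7 day then PySem.Set.add s day else s) s) s).Nodup := by
  induction hv generalizing s with
  | nil => exact hs
  | cons a t ih => exact ih _ (pv_nodup_foldl_add _ _ hs)

-- removing one element of a built set = deduplicating the filtered list, in length
theorem pv_len_discard (t : List Int) (d : Int) :
    (PySem.Set.discard (PySem.Set.ofList t) d).length =
      (PySem.Set.ofList (t.filter (fun x => x ≠ d))).length := by
  apply List.Perm.length_eq
  rw [List.perm_ext_iff_of_nodup
    (PySem.Set.nodup_discard _ _ (PySem.Set.nodup_ofList t)) (PySem.Set.nodup_ofList _)]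
  intro y
  simp [PySem.Set.mem_discard, PySem.Set.mem_ofList, List.mem_filter]

-- B's scan over a sorted list, running below a previous element p, counts the distinct elements ≠ p
theorem pv_scan_some (t : List Int) (p c : Int) (hs : t.Pairwise (· ≤ ·))
    (hlb : ∀ x ∈ t, p ≤ x) :
    (t.foldl (fun st d => if st.2 == none || !(some d == st.2) then (st.1 + 1, some d) else st)
        (c, some p)).1 =
      c + ((PySem.Set.ofList (t.filter (fun x => x ≠ p))).length : Int) := by
  induction t generalizing p c with
  | nil => simp
  | cons d t ih =>
      have hdt : ∀ x ∈ t, d ≤ x := fun x hx => (List.pairwise_cons.mp hs).1 x hx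
      have hst : t.Pairwise (· ≤ ·) := (List.pairwise_cons.mp hs).2
      by_cases hd : d = p
      · subst hd
        simp only [List.foldl_cons, List.filter_cons]
        rw [if_neg (by simp)]
        rw [ih d c hst hdt]
        simp
      · have hpd : p < d := lt_of_le_of_ne (hlb d (List.mem_cons_self)) (fun h => hd h.symm)
        simp only [List.foldl_cons]
        rw [if_pos (by simp [hd])]
        rw [ih d (c + 1) hst hdt]
        have hfil : t.filter (fun x => x ≠ p) = t := by
          apply List.filter_eq_self.mpr
          intro x hx
          have : d ≤ x := hdt x hx
          simp only [ne_eq, decide_eq_true_eq]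
          omega
        have hfil2 : (d :: t).filter (fun x => x ≠ p) = d :: t := by
          simp only [List.filter_cons, hfil]
          rw [if_pos (by simp [hd])]
        rw [hfil2, PySem.Set.ofList_cons]
        have := pv_len_discard t d
        simp only [List.length_cons, this]
        push_cast
        ring

-- B's full scan over a sorted list counts the distinct elements
theorem pv_scan_none (l : List Int) (c : Int) (hs : l.Pairwise (· ≤ ·)) :
    (l.foldl (fun st d => if st.2 == none || !(some d == st.2) then (st.1 + 1, some d) else st)
        (c, (none : Option Int))).1 =
      c + ((PySem.Set.ofList l).length : Int) := by
  cases l with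
  | nil => simp
  | cons d t =>
      simp only [List.foldl_cons]
      rw [if_pos (by simp)]
      rw [pv_scan_some t d (c + 1) (List.pairwise_cons.mp hs).2 (List.pairwise_cons.mp hs).1]
      rw [PySem.Set.ofList_cons]
      have := pv_len_discard t d
      simp only [List.length_cons, this]
      push_cast
      ring

-- A's HashSet agrees with the abstract PySem.Set fold of the inner day loop (membership and size)
theorem pv_hash_inner (l : List Int) (m : Std.HashSet Int) (s : PySem.Set Int)
    (hmem : ∀ x, x ∈ m ↔ x ∈ s) (hsz : m.size = s.length) :
    (∀ x, x ∈ l.foldl (fun m day => if pvP7 day then m.insert day else m) m ↔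
        x ∈ l.foldl (fun s day => if pvP7 day then PySem.Set.add s day else s) s) ∧
    (l.foldl (fun m day => if pvP7 day then m.insert day else m) m).size =
      (l.foldl (fun s day => if pvP7 day then PySem.Set.add s day else s) s).length := by
  induction l generalizing m s with
  | nil => exact ⟨hmem, hsz⟩
  | cons d t ih =>
      simp only [List.foldl_cons]
      by_cases hp : pvP7 d = true
      · rw [if_pos hp, if_pos hp]
        refine ih _ _ (fun x => ?_) ?_
        · rw [Std.HashSet.mem_insert, PySem.Set.mem_add, hmem]
          simp only [beq_iff_eq]
          constructor
          · rintro (rfl | hx)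
            · exact Or.inr rfl
            · exact Or.inl hx
          · rintro (hx | rfl)
            · exact Or.inr hx
            · exact Or.inl rfl
        · rw [Std.HashSet.size_insert, PySem.Set.add_eq_ite]
          by_cases hd : d ∈ s
          · rw [if_pos ((hmem d).mpr hd), if_pos hd, hsz]
          · rw [if_neg (fun h => hd ((hmem d).mp h)), if_neg hd, hsz]
            simp
      · rw [if_neg hp, if_neg hp]
        exact ih _ _ hmem hsz

-- … and of A's whole double loop
theorem pv_hash_outer (days : Int) (hv : List Int) (m : Std.HashSet Int) (s : PySem.Set Int)
    (hmem : ∀ x, x ∈ m ↔ x ∈ s) (hsz : m.size = s.length) :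
    (hv.foldl (fun m h =>
        (PySem.List.pyRange h (days + 1) h).foldl
          (fun m day => if pvP7 day then m.insert day else m) m) m).size =
      (hv.foldl (fun s h =>
        (PySem.List.pyRange h (days + 1) h).foldl
          (fun s day => if pvP7 day then PySem.Set.add s day else s) s) s).length := by
  induction hv generalizing m s with
  | nil => exact hsz
  | cons a t ih =>
      simp only [List.foldl_cons]
      obtain ⟨h1, h2⟩ := pv_hash_inner (PySem.List.pyRange a (days + 1) a) m s hmem hsz
      exact ih _ _ h1 h2

-- per-case agreement: A's set size = B's distinct-count of the sorted flat list
theorem pv_case_eq (days : Int) (hv : List Int) :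
    ((hv.foldl (fun m h =>
        (PySem.List.pyRange h (days + 1) h).foldl
          (fun m day => if pvP7 day then m.insert day else m) m)
        (∅ : Std.HashSet Int)).size : Int) =
    (((hv.flatMap (fun h => (PySem.List.pyRange h (days + 1) h).filter pvP7)).mergeSort
        (fun a b => a ≤ b)).foldl
      (fun st d => if st.2 == none || !(some d == st.2) then (st.1 + 1, some d) else st)
      ((0 : Int), (none : Option Int))).1 := by
  set L := hv.flatMap (fun h => (PySem.List.pyRange h (days + 1) h).filter pvP7) with hL
  have hsorted : (L.mergeSort (fun a b => a ≤ b)).Pairwise (· ≤ ·) := by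
    have := List.pairwise_mergeSort (le := fun a b : Int => decide (a ≤ b))
      (fun a b c h1 h2 => by simp at h1 h2 ⊢; omega)
      (fun a b => by simp; omega) L
    simpa using this
  rw [pv_scan_none _ _ hsorted, zero_add]
  rw [pv_hash_outer days hv ∅ PySem.Set.empty (by simp [PySem.Set.empty]) (by simp [PySem.Set.empty])]
  congr 1
  apply List.Perm.length_eq
  rw [List.perm_ext_iff_of_nodup (pv_nodup_lost days hv PySem.Set.empty (by simp [PySem.Set.empty]))
      (PySem.Set.nodup_ofList _)]
  intro y
  rw [pv_mem_lost, PySem.Set.mem_ofList, (List.mergeSort_perm L _).mem_iff, hL, List.mem_flatMap]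
  constructor
  · rintro (he | ⟨⟨h, hh, hy⟩, hp⟩)
    · exact absurd he (by simp [PySem.Set.empty])
    · exact ⟨h, hh, List.mem_filter.mpr ⟨hy, hp⟩⟩
  · rintro ⟨h, hh, hy⟩
    obtain ⟨hy, hp⟩ := List.mem_filter.mp hy
    exact Or.inr ⟨⟨h, hh, hy⟩, hp⟩

-- ===== VERDICT (by name: the statement is the Claim_ definition above) =====
theorem hartals_spec : Claim_equal_hartals := by
  intro test_cases _ _
  unfold Spec_hartals hartals hartals_alt
  rw [PySem.List.foldl_append_singleton_eq_map, PySem.List.foldl_append_singleton_eq_map]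
  simp only [List.nil_append]
  apply List.map_congr_left
  intro c _
  exact pv_case_eq c.1 c.2.2
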